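-- pv_equiv track=rewrite | github.com/akhandsingh17/assignments | codingexercise/SumNotCommonElements.py | SumNotCommonElements
-- ===== SOURCE A (Python) =====
-- def SumNotCommonElements(lst1,lst2):
--
--     dict={}
--
--     for l in lst1:
--
--         if l in dict.keys():
--             dict[l]=dict.get(l)+1
--         else:
--             dict[l]=1
--
--     for l in lst2:
--
--         if l in dict.keys():
--             dict[l]=dict.get(l)+1
--         else:
--             dict[l]=1
--
--     sum=0
--     for key,val in dict.items():
--         if val==1:
--             sum=sum+key
--
--     return sum
-- ===== SOURCE B (Python) =====
-- def SumNotCommonElements(lst1, lst2):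
--     s = sorted(lst1 + lst2)
--     total = 0
--     i = 0
--     n = len(s)
--     while i < n:
--         j = i + 1
--         while j < n and s[j] == s[i]:
--             j += 1
--         if j == i + 1:
--             total += s[i]
--         i = j
--     return total
-- ===== Notes on version B (the rewrite author's own statement) =====
-- stated objective: alternative
-- what changed: Sort-then-scan: sorts the concatenated list and sums the elements whose run of equal neighbours has length 1, replacing A's frequency-dictionary build plus items scan.
import Mathlib
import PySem

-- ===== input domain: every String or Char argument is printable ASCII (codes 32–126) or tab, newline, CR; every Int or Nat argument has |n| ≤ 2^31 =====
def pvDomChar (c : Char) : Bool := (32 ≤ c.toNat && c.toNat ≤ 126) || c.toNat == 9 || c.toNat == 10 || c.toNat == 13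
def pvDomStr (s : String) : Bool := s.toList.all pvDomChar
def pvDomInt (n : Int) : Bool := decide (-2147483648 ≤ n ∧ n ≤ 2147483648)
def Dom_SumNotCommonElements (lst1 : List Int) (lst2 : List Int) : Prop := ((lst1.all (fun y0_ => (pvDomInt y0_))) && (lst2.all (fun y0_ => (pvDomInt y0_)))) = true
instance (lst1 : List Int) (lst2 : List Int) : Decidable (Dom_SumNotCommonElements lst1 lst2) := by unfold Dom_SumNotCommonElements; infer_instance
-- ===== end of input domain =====

-- B sorts the concatenated list and sums the elements whose run of equal neighbours
-- has length 1 (sort-then-scan), replacing A's frequency dictionary; same return value.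

-- ===== PORT A =====
-- one counting-loop body: `if l in dict.keys(): dict[l]=dict.get(l)+1 else: dict[l]=1`
def pvCountStep (d : PySem.Dict Int Int) (l : Int) : PySem.Dict Int Int :=
  if d.contains l then d.insert l (d.getD l 0 + 1) else d.insert l 1

def SumNotCommonElements (lst1 : List Int) (lst2 : List Int) : Int :=
  let d0 : PySem.Dict Int Int := PySem.Dict.empty
  let d1 := lst1.foldl pvCountStep d0
  let d2 := lst2.foldl pvCountStep d1
  d2.items.foldl (fun s p => if p.2 = 1 then s + p.1 else s) 0

-- ===== PORT B =====
-- the outer while loop of Source B: take one run of equal elements, add its head if the run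
-- has length 1 (i.e. no equal neighbours follow), continue after the run
def pvRunScan : List Int → Int
  | [] => 0
  | x :: xs =>
    (if xs.takeWhile (fun y => y == x) = [] then x else 0) +
      pvRunScan (xs.dropWhile (fun y => y == x))
termination_by l => l.length
decreasing_by
  simp only [List.length_cons]
  exact Nat.lt_succ_of_le (List.length_dropWhile_le _ _)

def SumNotCommonElements_alt (lst1 : List Int) (lst2 : List Int) : Int :=
  pvRunScan (PySem.List.sorted (lst1 ++ lst2) (fun x => x) false)

-- ===== PRECONDITION & SPEC =====
def Spec_SumNotCommonElements (lst1 : List Int) (lst2 : List Int) (out : Int) : Prop := out = SumNotCommonElements_alt lst1 lst2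
instance (lst1 : List Int) (lst2 : List Int) (out : Int) : Decidable (Spec_SumNotCommonElements lst1 lst2 out) := by unfold Spec_SumNotCommonElements; infer_instance

-- ===== CLAIM (what is proved, stated in full; the proofs are below) =====
def Claim_equal_SumNotCommonElements : Prop := ∀ (lst1 : List Int) (lst2 : List Int), Dom_SumNotCommonElements lst1 lst2 → Spec_SumNotCommonElements lst1 lst2 (SumNotCommonElements lst1 lst2)

-- ===== LEMMAS AND PROOFS =====

-- A's counting step is the standard counter step
theorem pvCountStep_eq (d : PySem.Dict Int Int) (l : Int) :
    pvCountStep d l = d.insert l (d.getD l 0 + 1) := by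
  unfold pvCountStep
  split_ifs with h
  · rfl
  · have h0 : d.getD l 0 = 0 := by
      apply PySem.Dict.getD_of_not_contains; simpa using h
    rw [h0]; norm_num

theorem foldl_pvCountStep (l : List Int) (d : PySem.Dict Int Int) :
    l.foldl pvCountStep d = l.foldl (fun d x => d.insert x (d.getD x 0 + 1)) d := by
  induction l generalizing d with
  | nil => rfl
  | cons x xs ih => simp only [List.foldl_cons, pvCountStep_eq, ih]

-- conditional accumulation is a filtered sum
theorem foldl_if_sum (p : Int → Bool) (l : List Int) (s : Int) :
    l.foldl (fun s x => if p x then s + x else s) s = s + (l.filter p).sum := by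
  induction l generalizing s with
  | nil => simp
  | cons x xs ih =>
    simp only [List.foldl_cons, List.filter_cons]
    by_cases h : p x
    · simp [h, ih]; ring
    · simp [h, ih]

-- the count-1 elements of the dedup and of the list itself are the same multiset
theorem filter_dedup_perm (c : List Int) :
    ((PySem.List.dedup c).filter (fun x => c.count x == 1)).Perm
      (c.filter (fun x => c.count x == 1)) := by
  rw [List.perm_iff_count]
  intro y
  by_cases hy : c.count y = 1
  · rw [List.count_filter (by simpa using hy), List.count_filter (by simpa using hy), hy]
    have hmem : y ∈ PySem.List.dedup c := by
      rw [PySem.List.mem_dedup]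
      exact List.count_pos_iff.mp (by omega)
    exact List.count_eq_one_of_mem (PySem.List.nodup_dedup c) hmem
  · have h' : ¬ ((fun x => c.count x == 1) y = true) := by simpa using hy
    have e1 : ((PySem.List.dedup c).filter (fun x => c.count x == 1)).count y = 0 :=
      List.count_eq_zero.mpr (fun hm => h' (List.mem_filter.mp hm).2)
    have e2 : (c.filter (fun x => c.count x == 1)).count y = 0 :=
      List.count_eq_zero.mpr (fun hm => h' (List.mem_filter.mp hm).2)
    rw [e1, e2]

-- A's value is the sum of the elements of c that occur exactly once in c
theorem portA_eq_filter_sum (lst1 lst2 : List Int) :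
    SumNotCommonElements lst1 lst2
      = ((lst1 ++ lst2).filter (fun x => (lst1 ++ lst2).count x == 1)).sum := by
  unfold SumNotCommonElements
  simp only []
  set c := lst1 ++ lst2 with hc
  have h1 : lst2.foldl pvCountStep (lst1.foldl pvCountStep PySem.Dict.empty)
      = PySem.Dict.counter c := by
    rw [← List.foldl_append, foldl_pvCountStep,
        PySem.Dict.foldl_insert_getD_add_one_eq_counter]
  rw [h1, PySem.Dict.items_counter, List.foldl_map, ← PySem.List.dedup_eq_ofList]
  have hfn : (fun (s : Int) (k : Int) => if ((c.count k : Int) = 1) then s + k else s)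
      = (fun s k => if c.count k == 1 then s + k else s) := by
    funext s k
    by_cases h : c.count k = 1 <;> simp [h]
  calc (PySem.List.dedup c).foldl
        (fun s k => if ((c.count k : Int) = 1) then s + k else s) 0
      = (PySem.List.dedup c).foldl (fun s k => if c.count k == 1 then s + k else s) 0 := by
        rw [hfn]
    _ = 0 + ((PySem.List.dedup c).filter (fun x => c.count x == 1)).sum :=
        foldl_if_sum _ _ _
    _ = (c.filter (fun x => c.count x == 1)).sum := by
        rw [zero_add, (filter_dedup_perm c).sum_eq]

-- equation lemmas for the well-founded run scan
theorem pvRunScan_nil : pvRunScan [] = 0 := by simp [pvRunScan]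

theorem pvRunScan_cons (x : Int) (xs : List Int) :
    pvRunScan (x :: xs) =
      (if xs.takeWhile (fun y => y == x) = [] then x else 0) +
        pvRunScan (xs.dropWhile (fun y => y == x)) := by
  rw [pvRunScan]

-- on a sorted tail, everything after the leading run of x is strictly greater than x
theorem dropWhile_gt (x : Int) (xs : List Int) (hle : ∀ y ∈ xs, x ≤ y)
    (hs : xs.Pairwise (· ≤ ·)) : ∀ y ∈ xs.dropWhile (fun y => y == x), x < y := by
  rcases hd : xs.dropWhile (fun y => y == x) with _ | ⟨h, rs⟩
  · intro y hy; simp at hy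
  · have hsub : (h :: rs).Sublist xs := hd ▸ List.dropWhile_sublist _
    have hhne : ¬ ((h == x) = true) := by
      have := List.head_dropWhile_not (p := fun y => y == x) (l := xs)
        (w := by rw [hd]; simp)
      simpa [hd] using this
    have hh_mem : h ∈ xs := hsub.mem (by simp)
    have hxh : x < h := lt_of_le_of_ne (hle h hh_mem) (fun e => hhne (by simp [← e]))
    have hps : (h :: rs).Pairwise (α := Int) (· ≤ ·) := hs.sublist hsub
    intro y hy
    rcases List.mem_cons.mp hy with he | hm
    · exact he ▸ hxh
    · exact lt_of_lt_of_le hxh ((List.pairwise_cons.mp hps).1 y hm)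

-- on a sorted list, the run scan computes the sum of the count-1 elements
theorem runScan_sorted (n : Nat) : ∀ (t : List Int), t.length ≤ n →
    t.Pairwise (· ≤ ·) →
    pvRunScan t = (t.filter (fun x => t.count x == 1)).sum := by
  induction n with
  | zero =>
    intro t ht _
    have : t = [] := List.length_eq_zero_iff.mp (Nat.le_zero.mp ht)
    subst this; simp [pvRunScan_nil]
  | succ n ih =>
    intro t ht hs
    match t with
    | [] => simp [pvRunScan_nil]
    | x :: xs =>
      have hxle : ∀ y ∈ xs, x ≤ y := (List.pairwise_cons.mp hs).1
      have hxs_sorted : xs.Pairwise (α := Int) (· ≤ ·) := (List.pairwise_cons.mp hs).2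
      have hsplit : xs.takeWhile (fun y => y == x) ++ xs.dropWhile (fun y => y == x) = xs :=
        List.takeWhile_append_dropWhile
      generalize ha : xs.takeWhile (fun y => y == x) = a at *
      generalize hr : xs.dropWhile (fun y => y == x) = r at *
      have ha_eq : ∀ y ∈ a, y = x := by
        intro y hy
        have := List.mem_takeWhile_imp (ha ▸ hy)
        simpa using this
      have hr_gt : ∀ y ∈ r, x < y := hr ▸ dropWhile_gt x xs hxle hxs_sorted
      have hr_notmem : x ∉ r := fun hm => lt_irrefl x (hr_gt x hm)
      have hr_sorted : r.Pairwise (α := Int) (· ≤ ·) :=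
        hxs_sorted.sublist (hr ▸ List.dropWhile_sublist _)
      have hr_len : r.length ≤ n := by
        have h1 : a.length + r.length = xs.length := by
          rw [← List.length_append, hsplit]
        have h2 := ht
        simp only [List.length_cons] at h2
        omega
      have hcx : (x :: xs).count x = 1 + a.length := by
        have hca : a.count x = a.length := List.count_eq_length.mpr
          (fun y hy => by simp [ha_eq y hy])
        have hcr : r.count x = 0 := List.count_eq_zero.mpr hr_notmem
        rw [← hsplit]
        simp [List.count_append, hca, hcr]
        omega
      have hcr_eq : ∀ y ∈ r, (x :: xs).count y = r.count y := by
        intro y hy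
        have hne : y ≠ x := fun e => lt_irrefl x (e ▸ hr_gt y hy)
        have hca0 : a.count y = 0 := List.count_eq_zero.mpr
          (fun hm => hne (ha_eq y hm))
        rw [← hsplit]
        simp [List.count_cons, List.count_append, hca0]
        exact fun e => hne e.symm
      -- split the filtered list at the leading run
      have hassoc : (x :: xs) = (x :: a) ++ r := by rw [← hsplit]; rfl
      have hfilter : ((x :: xs).filter (fun z => (x :: xs).count z == 1))
          = (if a = [] then [x] else []) ++ r.filter (fun z => r.count z == 1) := by
        conv_lhs => rw [hassoc]
        rw [List.filter_append]
        have hcx' : (x :: (a ++ r)).count x = 1 + a.length := by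
          rw [show x :: (a ++ r) = x :: xs from by rw [hsplit]]
          exact hcx
        congr 1
        · by_cases hanil : a = []
          · subst hanil
            have h1 : (x :: ([] ++ r)).count x = 1 := by simpa using hcx'
            simp only [List.nil_append] at h1 ⊢
            simp [h1]
          · rw [if_neg hanil, List.filter_eq_nil_iff]
            intro z hz
            have hzx : z = x := by
              rcases List.mem_cons.mp hz with he | hm
              · exact he
              · exact ha_eq z hm
            subst hzx
            have hlen : 1 ≤ a.length := by
              cases a with
              | nil => exact absurd rfl hanil
              | cons _ _ => simp
            simp [hcx']
            omega
        · exact List.filter_congr (fun y hy => by rw [show x :: a ++ r = x :: xs from hassoc.symm, hcr_eq y hy])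
      rw [pvRunScan_cons, ha, hr, hfilter, ih r hr_len hr_sorted]
      by_cases hanil : a = []
      · simp [hanil]
      · simp [hanil]

-- ===== VERDICT (by name: the statement is the Claim_ definition above) =====

theorem SumNotCommonElements_spec : Claim_equal_SumNotCommonElements := by
  intro lst1 lst2 _
  unfold Spec_SumNotCommonElements SumNotCommonElements_alt
  rw [portA_eq_filter_sum]
  set c := lst1 ++ lst2 with hc
  set t := PySem.List.sorted c (fun x => x) false with htdef
  have hperm : t.Perm c := PySem.List.sorted_perm c _ false
  have hsorted : t.Pairwise (α := Int) (· ≤ ·) := by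
    simpa using PySem.List.sorted_pairwise (xs := c) (key := fun x => x)
  rw [runScan_sorted t.length t le_rfl hsorted]
  have hcnt : (fun x => t.count x == 1) = (fun x => c.count x == 1) := by
    funext x; rw [hperm.count_eq]
  rw [hcnt]
  exact ((hperm.filter _).sum_eq).symm
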